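-- pv_equiv track=rewrite | github.com/lugezz/repo_testing | recursivity/greatest_2_letters_difference.py | find_greatest_distance
-- ===== SOURCE A (Python) =====
-- def find_greatest_distance(text, group_size):
--     positions = {}
--     max_distance = -1
--
--     for i in range(len(text) - group_size + 1):
--         group = text[i:i+group_size]
--         if group in positions:
--             distance = i - positions[group]
--             max_distance = max(max_distance, distance)
--         else:
--             positions[group] = i
--
--     return max_distance
-- ===== SOURCE B (Python) =====
-- def find_greatest_distance(text, group_size):
--     # Brute-force distance search, no hashing: try each candidate distance d
--     # from largest to smallest and return the first d at which some
--     # group_size-substring repeats exactly d positions apart.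
--     n_starts = len(text) - group_size + 1
--     d = n_starts - 1
--     while d > 0:
--         if any(text[i:i+group_size] == text[i+d:i+d+group_size]
--                for i in range(n_starts - d)):
--             return d
--         d -= 1
--     return -1
-- ===== Notes on version B (the rewrite author's own statement) =====
-- stated objective: alternative
-- what changed: Replaces A's dictionary-of-first-occurrences scan by a dictionary-free brute-force search: candidate distances d are tried from largest to smallest and the first d at which some group repeats exactly d apart is returned.
import Mathlib
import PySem

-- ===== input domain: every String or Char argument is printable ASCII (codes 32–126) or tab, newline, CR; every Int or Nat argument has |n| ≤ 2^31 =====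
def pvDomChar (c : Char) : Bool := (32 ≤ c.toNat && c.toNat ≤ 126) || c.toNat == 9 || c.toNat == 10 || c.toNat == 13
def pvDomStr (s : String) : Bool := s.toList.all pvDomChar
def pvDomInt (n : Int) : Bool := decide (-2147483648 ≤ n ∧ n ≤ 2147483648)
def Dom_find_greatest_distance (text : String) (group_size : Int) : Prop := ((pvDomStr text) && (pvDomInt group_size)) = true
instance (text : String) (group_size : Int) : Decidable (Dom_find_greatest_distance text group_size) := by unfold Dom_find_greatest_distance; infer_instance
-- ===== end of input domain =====

-- B replaces A's dictionary-of-first-occurrences single scan by a dictionary-free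
-- brute-force search over candidate distances, largest first; objective: alternative.

-- ===== PORT A =====
def find_greatest_distance (text : String) (group_size : Int) : Int :=
  ((PySem.List.pyRange 0 (PySem.Str.len text - group_size + 1) 1).foldl
    (fun (st : PySem.Dict String Int × Int) i =>
      let group := PySem.Str.slice text (some i) (some (i + group_size))
      match st.1.get? group with
      | some p => (st.1, max st.2 (i - p))
      | none => (st.1.insert group i, st.2))
    (PySem.Dict.empty, -1)).2

-- ===== PORT B =====
-- the `any(... for i in range(n_starts - d))` test of Source B
def pvAnyAt (text : String) (group_size m d : Int) : Bool :=
  (PySem.List.pyRange 0 (m - d) 1).any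
    (fun i => PySem.Str.slice text (some i) (some (i + group_size))
           == PySem.Str.slice text (some (i + d)) (some (i + d + group_size)))

-- the `while d > 0` loop of Source B (early return on a hit, else d -= 1)
def pvGoB (text : String) (group_size m d : Int) : Int :=
  if h : 0 < d then
    if pvAnyAt text group_size m d then d
    else pvGoB text group_size m (d - 1)
  else -1
termination_by d.toNat
decreasing_by omega

def find_greatest_distance_alt (text : String) (group_size : Int) : Int :=
  let n_starts := PySem.Str.len text - group_size + 1
  pvGoB text group_size n_starts (n_starts - 1)

-- ===== PRECONDITION & SPEC =====
def Spec_find_greatest_distance (text : String) (group_size : Int) (out : Int) : Prop := out = find_greatest_distance_alt text group_size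
instance (text : String) (group_size : Int) (out : Int) : Decidable (Spec_find_greatest_distance text group_size out) := by unfold Spec_find_greatest_distance; infer_instance

-- ===== CLAIM (what is proved, stated in full; the proofs are below) =====
def Claim_equal_find_greatest_distance : Prop := ∀ (text : String) (group_size : Int), Dom_find_greatest_distance text group_size → Spec_find_greatest_distance text group_size (find_greatest_distance text group_size)

-- ===== LEMMAS AND PROOFS =====

-- "some pair of equal groups at distance d, both starts drawn from l"
def pvHP (k : Int → String) (l : List Int) (d : Int) : Prop :=
  ∃ i ∈ l, ∃ j ∈ l, i < j ∧ k i = k j ∧ j - i = d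

-- the common characterisation: r is the greatest pair distance, or -1 if none
def pvAcc (k : Int → String) (l : List Int) (r : Int) : Prop :=
  (-1 ≤ r) ∧ (r = -1 ∨ pvHP k l r) ∧ (∀ d, pvHP k l d → d ≤ r)

lemma pvAcc_unique (k : Int → String) (l : List Int) (r s : Int)
    (hr : pvAcc k l r) (hs : pvAcc k l s) : r = s := by
  obtain ⟨hr1, hr2, hr3⟩ := hr
  obtain ⟨hs1, hs2, hs3⟩ := hs
  rcases hr2 with rfl | hr2 <;> rcases hs2 with rfl | hs2
  · rfl
  · have := hr3 s hs2; omega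
  · have := hs3 r hr2; omega
  · have := hr3 s hs2; have := hs3 r hr2; omega

lemma pvHP_mono (k : Int → String) (l : List Int) (j d : Int)
    (h : pvHP k l d) : pvHP k (l ++ [j]) d := by
  obtain ⟨i, hi, j', hj', h⟩ := h
  exact ⟨i, List.mem_append_left _ hi, j', List.mem_append_left _ hj', h⟩

def pvOcc (k : Int → String) (l : List Int) (g : String) : List Int :=
  l.filter (fun i => k i == g)

def pvStepA (k : Int → String) (st : PySem.Dict String Int × Int) (i : Int) :
    PySem.Dict String Int × Int :=
  match st.1.get? (k i) with
  | some p => (st.1, max st.2 (i - p))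
  | none => (st.1.insert (k i) i, st.2)

lemma pvHead_le (l : List Int) (p : Int) (hp : l.Pairwise (· < ·))
    (hh : l.head? = some p) : ∀ x ∈ l, p ≤ x := by
  cases l with
  | nil => simp at hh
  | cons a t =>
    simp only [List.head?_cons, Option.some.injEq] at hh
    subst hh
    intro x hx
    rcases List.mem_cons.mp hx with rfl | hx
    · exact le_refl x
    · exact le_of_lt ((List.pairwise_cons.mp hp).1 x hx)

lemma pvA_char (k : Int → String) (l : List Int) (hl : l.Pairwise (· < ·)) :
    (∀ g, ((l.foldl (pvStepA k) (PySem.Dict.empty, -1)).1).get? g = (pvOcc k l g).head?)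
    ∧ pvAcc k l (l.foldl (pvStepA k) (PySem.Dict.empty, -1)).2 := by
  induction l using List.reverseRecOn with
  | nil =>
    refine ⟨fun g => by simp [pvOcc, PySem.Dict.get?_empty], le_refl _, Or.inl rfl, ?_⟩
    rintro d ⟨i, hi, -⟩; simp at hi
  | append_singleton l j ih =>
    rw [List.pairwise_append] at hl
    obtain ⟨hpl, -, hltall⟩ := hl
    have hlt : ∀ x ∈ l, x < j := fun x hx => hltall x hx j (List.mem_singleton_self j)
    obtain ⟨ihfst, ih1, ih2, ih3⟩ := ih hpl
    rw [List.foldl_append, List.foldl_cons, List.foldl_nil] at *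
    set st := l.foldl (pvStepA k) (PySem.Dict.empty, -1) with hst
    cases hca : st.1.get? (k j) with
    | none =>
      have hocc : pvOcc k l (k j) = [] := by
        have := ihfst (k j); rw [hca] at this
        exact List.head?_eq_none_iff.mp this.symm
      have hnoi : ∀ i ∈ l, k i ≠ k j := by
        intro i hi hk
        have : i ∈ pvOcc k l (k j) := List.mem_filter.mpr ⟨hi, by simp [hk]⟩
        rw [hocc] at this; simp at this
      have hstep : pvStepA k st j = (st.1.insert (k j) j, st.2) := by
        unfold pvStepA; rw [hca]
      have hHP : ∀ d, pvHP k (l ++ [j]) d → pvHP k l d := by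
        rintro d ⟨i, hi, j2, hj2, hij, hkk, hdd⟩
        rcases List.mem_append.mp hi with hi1 | hi1
        · rcases List.mem_append.mp hj2 with hj1 | hj1
          · exact ⟨i, hi1, j2, hj1, hij, hkk, hdd⟩
          · exfalso
            have hj2j : j2 = j := List.mem_singleton.mp hj1
            exact hnoi i hi1 (by rw [hkk, hj2j])
        · exfalso
          have hieq : i = j := List.mem_singleton.mp hi1
          rcases List.mem_append.mp hj2 with hj1 | hj1
          · have := hlt j2 hj1; omega
          · have := List.mem_singleton.mp hj1; omega
      refine ⟨?_, ?_, ?_, ?_⟩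
      · intro g
        rw [hstep]
        show (st.1.insert (k j) j).get? g = (pvOcc k (l ++ [j]) g).head?
        rw [PySem.Dict.get?_insert]
        by_cases hg : g = k j
        · subst hg
          rw [if_pos rfl]
          unfold pvOcc at hocc ⊢
          rw [List.filter_append, hocc, List.filter_singleton]
          simp
        · rw [if_neg hg, ihfst g]
          unfold pvOcc
          rw [List.filter_append, List.filter_singleton]
          have h1 : (k j == g) = false := by simp; exact fun h => hg h.symm
          rw [h1, cond_false, List.append_nil]
      · rw [hstep]; exact ih1
      · rw [hstep]
        show st.2 = -1 ∨ pvHP k (l ++ [j]) st.2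
        rcases ih2 with h | h
        · exact Or.inl h
        · exact Or.inr (pvHP_mono k l j _ h)
      · rw [hstep]
        intro d hd
        show d ≤ st.2
        exact ih3 d (hHP d hd)
    | some p =>
      have hhead : (pvOcc k l (k j)).head? = some p := by rw [← ihfst (k j), hca]
      have hpmemocc : p ∈ pvOcc k l (k j) := List.mem_of_mem_head? hhead
      have hpmem : p ∈ l := (List.mem_filter.mp hpmemocc).1
      have hkp : k p = k j := by
        have := (List.mem_filter.mp hpmemocc).2; simpa using this
      have hpj : p < j := hlt p hpmem
      have hocc_pw : (pvOcc k l (k j)).Pairwise (· < ·) := List.Pairwise.filter _ hpl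
      have hple : ∀ x ∈ l, k x = k j → p ≤ x := by
        intro x hx hk
        exact pvHead_le _ p hocc_pw hhead x (List.mem_filter.mpr ⟨hx, by simp [hk]⟩)
      have hstep : pvStepA k st j = (st.1, max st.2 (j - p)) := by
        unfold pvStepA; rw [hca]
      refine ⟨?_, ?_, ?_, ?_⟩
      · intro g
        rw [hstep]
        show st.1.get? g = (pvOcc k (l ++ [j]) g).head?
        unfold pvOcc
        rw [List.filter_append, List.filter_singleton]
        by_cases hg : g = k j
        · subst hg
          rw [beq_self_eq_true, cond_true]
          have hocc' := hhead
          unfold pvOcc at hocc'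
          cases hflt : List.filter (fun i => k i == k j) l with
          | nil => rw [hflt] at hocc'; simp at hocc'
          | cons a t =>
            rw [hflt] at hocc'
            simp only [List.head?_cons, Option.some.injEq] at hocc'
            rw [hca]
            simp [hocc']
        · have h1 : (k j == g) = false := by simp; exact fun h => hg h.symm
          rw [h1, cond_false, List.append_nil, ihfst g]
          rfl
      · rw [hstep]
        show -1 ≤ max st.2 (j - p)
        exact le_trans ih1 (le_max_left _ _)
      · rw [hstep]
        show max st.2 (j - p) = -1 ∨ pvHP k (l ++ [j]) (max st.2 (j - p))
        right
        rcases le_total (j - p) st.2 with h | h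
        · rw [max_eq_left h]
          rcases ih2 with h2 | h2
          · exact absurd h (by omega)
          · exact pvHP_mono k l j _ h2
        · rw [max_eq_right h]
          exact ⟨p, List.mem_append_left _ hpmem, j,
            List.mem_append_right _ (List.mem_singleton_self j), hpj, hkp, rfl⟩
      · rw [hstep]
        rintro d ⟨i, hi, j2, hj2, hij, hkk, hdd⟩
        show d ≤ max st.2 (j - p)
        rcases List.mem_append.mp hj2 with hj1 | hj1
        · rcases List.mem_append.mp hi with hi1 | hi1
          · exact le_trans (ih3 d ⟨i, hi1, j2, hj1, hij, hkk, hdd⟩) (le_max_left _ _)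
          · exfalso
            have hieq : i = j := List.mem_singleton.mp hi1
            have := hlt j2 hj1; omega
        · have hjeq : j2 = j := List.mem_singleton.mp hj1
          rcases List.mem_append.mp hi with hi1 | hi1
          · have hp2 : p ≤ i := hple i hi1 (by rw [← hjeq]; exact hkk)
            exact le_trans (by omega) (le_max_right _ _)
          · exfalso
            have := List.mem_singleton.mp hi1
            omega

-- B side: the inner `any` finds a pair at distance d
lemma pvAnyAt_iff (text : String) (gs m d : Int) (hd : 0 < d) :
    pvAnyAt text gs m d = true ↔
      pvHP (fun i => PySem.Str.slice text (some i) (some (i + gs)))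
        (PySem.List.pyRange 0 m 1) d := by
  unfold pvAnyAt pvHP
  rw [List.any_eq_true]
  constructor
  · rintro ⟨i, hi, hk⟩
    rw [PySem.List.mem_pyRange_one] at hi
    refine ⟨i, ?_, i + d, ?_, by omega, beq_iff_eq.mp hk, by ring⟩
    · rw [PySem.List.mem_pyRange_one]; omega
    · rw [PySem.List.mem_pyRange_one]; omega
  · rintro ⟨i, hi, j, hj, hij, hk, hdd⟩
    rw [PySem.List.mem_pyRange_one] at hi hj
    refine ⟨i, ?_, ?_⟩
    · rw [PySem.List.mem_pyRange_one]; omega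
    · have : j = i + d := by omega
      rw [this] at hk
      exact beq_iff_eq.mpr hk

lemma pvHP_bounds (text : String) (gs m d : Int)
    (h : pvHP (fun i => PySem.Str.slice text (some i) (some (i + gs)))
        (PySem.List.pyRange 0 m 1) d) : 1 ≤ d ∧ d ≤ m - 1 := by
  obtain ⟨i, hi, j, hj, hij, -, hd⟩ := h
  rw [PySem.List.mem_pyRange_one] at hi hj
  omega

lemma pvGoB_correct (text : String) (gs m : Int) :
    ∀ n : Nat, ∀ d : Int, d.toNat = n →
    (∀ d', d < d' → ¬ pvHP (fun i => PySem.Str.slice text (some i) (some (i + gs)))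
        (PySem.List.pyRange 0 m 1) d') →
    pvAcc (fun i => PySem.Str.slice text (some i) (some (i + gs)))
        (PySem.List.pyRange 0 m 1) (pvGoB text gs m d) := by
  intro n
  induction n with
  | zero =>
    intro d hdn hno
    have hd : ¬ 0 < d := by omega
    rw [pvGoB, dif_neg hd]
    refine ⟨le_refl _, Or.inl rfl, ?_⟩
    intro d' hd'
    exfalso
    refine hno d' ?_ hd'
    have := pvHP_bounds text gs m d' hd'
    omega
  | succ n ih =>
    intro d hdn hno
    by_cases hd : 0 < d
    · rw [pvGoB, dif_pos hd]
      cases hany : pvAnyAt text gs m d with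
      | true =>
        simp only [if_true]
        have hHP := (pvAnyAt_iff text gs m d hd).mp hany
        refine ⟨by omega, Or.inr hHP, ?_⟩
        intro d' hd'
        by_contra hgt
        exact hno d' (by omega) hd'
      | false =>
        simp only [Bool.false_eq_true, if_false]
        refine ih (d - 1) (by omega) ?_
        intro d' hlt hd'
        by_cases heq : d' = d
        · subst heq
          exact absurd ((pvAnyAt_iff text gs m d' hd).mpr hd') (by simp [hany])
        · exact hno d' (by omega) hd'
    · rw [pvGoB, dif_neg hd]
      refine ⟨le_refl _, Or.inl rfl, ?_⟩
      intro d' hd'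
      exfalso
      refine hno d' ?_ hd'
      have := pvHP_bounds text gs m d' hd'
      omega

-- ===== VERDICT (by name: the statement is the Claim_ definition above) =====
theorem find_greatest_distance_spec : Claim_equal_find_greatest_distance := by
  intro text group_size _
  unfold Spec_find_greatest_distance
  set k : Int → String := fun i => PySem.Str.slice text (some i) (some (i + group_size)) with hk
  set m : Int := PySem.Str.len text - group_size + 1 with hm
  set l : List Int := PySem.List.pyRange 0 m 1 with hl
  have hA : pvAcc k l (find_greatest_distance text group_size) := by
    have := (pvA_char k l (by rw [hl]; exact PySem.List.pairwise_lt_pyRange_one 0 m)).2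
    exact this
  have hB : pvAcc k l (find_greatest_distance_alt text group_size) := by
    show pvAcc k l (pvGoB text group_size m (m - 1))
    refine pvGoB_correct text group_size m (m - 1).toNat (m - 1) rfl ?_
    intro d' hlt hd'
    have := pvHP_bounds text group_size m d' hd'
    omega
  exact pvAcc_unique k l _ _ hA hB
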